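-- pv_equiv track=rewrite | github.com/weeb3dev/ad-engine | evaluate/judge.py | _pick_references
-- ===== SOURCE A (Python) =====
-- from typing import Any
--
-- def _format_reference_ad(ad: dict[str, Any]) -> str:
--     """Format a calibration ad as a readable string for prompt injection."""
--     return (
--         f"Primary Text: {ad['primary_text']}\n"
--         f"Headline: {ad['headline']}\n"
--         f"Description: {ad['description']}\n"
--         f"CTA Button: {ad['cta_button']}"
--     )
--
-- def _pick_references(
--     calibration_ads: list[dict[str, Any]],
-- ) -> tuple[str, str]:
--     """Pick one high-scoring and one low-scoring reference ad."""
--     high_ads = [a for a in calibration_ads if a["expected_quality"] == "high"]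
--     low_ads = [a for a in calibration_ads if a["expected_quality"] == "low"]
--     high_ref = _format_reference_ad(high_ads[0]) if high_ads else "N/A"
--     low_ref = _format_reference_ad(low_ads[0]) if low_ads else "N/A"
--     return high_ref, low_ref
-- ===== SOURCE B (Python) =====
-- from typing import Any
--
--
-- def _format_reference_ad(ad: dict[str, Any]) -> str:
--     """Format a calibration ad as a readable string for prompt injection."""
--     return (
--         f"Primary Text: {ad['primary_text']}\n"
--         f"Headline: {ad['headline']}\n"
--         f"Description: {ad['description']}\n"
--         f"CTA Button: {ad['cta_button']}"
--     )
--
--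
-- def _pick_references(
--     calibration_ads: list[dict[str, Any]],
-- ) -> tuple[str, str]:
--     """Pick one high-scoring and one low-scoring reference ad."""
--     high_ref = None
--     low_ref = None
--     for ad in calibration_ads:
--         q = ad["expected_quality"]
--         if q == "high" and high_ref is None:
--             high_ref = _format_reference_ad(ad)
--         elif q == "low" and low_ref is None:
--             low_ref = _format_reference_ad(ad)
--     return (
--         "N/A" if high_ref is None else high_ref,
--         "N/A" if low_ref is None else low_ref,
--     )
-- ===== Notes on version B (the rewrite author's own statement) =====
-- stated objective: simpler
-- what changed: Replaces the two full list-comprehension passes (plus conditional indexing) with a single loop that records the first high and first low ad in None-initialised accumulators.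
import Mathlib
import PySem

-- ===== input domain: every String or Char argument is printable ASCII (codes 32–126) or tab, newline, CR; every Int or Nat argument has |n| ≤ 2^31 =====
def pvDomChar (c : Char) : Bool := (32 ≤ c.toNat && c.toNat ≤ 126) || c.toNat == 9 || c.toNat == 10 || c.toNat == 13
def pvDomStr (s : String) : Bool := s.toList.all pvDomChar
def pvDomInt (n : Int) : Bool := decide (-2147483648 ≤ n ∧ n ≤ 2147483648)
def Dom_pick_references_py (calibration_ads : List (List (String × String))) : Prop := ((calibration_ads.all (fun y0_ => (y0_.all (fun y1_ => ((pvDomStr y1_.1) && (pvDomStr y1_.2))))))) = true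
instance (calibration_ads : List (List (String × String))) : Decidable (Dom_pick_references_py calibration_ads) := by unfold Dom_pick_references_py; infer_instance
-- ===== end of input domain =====

-- B changes the decomposition only (one loop instead of two comprehensions); return values agree wherever A returns.

-- dict lookup on an association list: first matching key (shared helper, = ad[k] returning Option)
def pvGet (ad : List (String × String)) (k : String) : Option String :=
  (ad.find? (fun p => p.1 == k)).map (·.2)

-- _format_reference_ad (shared helper of both Pythons); under Pre_ every key it reads is present
def pvFmt (ad : List (String × String)) : String :=
  "Primary Text: " ++ (pvGet ad "primary_text").getD "" ++
  "\nHeadline: " ++ (pvGet ad "headline").getD "" ++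
  "\nDescription: " ++ (pvGet ad "description").getD "" ++
  "\nCTA Button: " ++ (pvGet ad "cta_button").getD ""

-- ===== PORT A =====
def pick_references_py (calibration_ads : List (List (String × String))) : String × String :=
  let high_ads := calibration_ads.filter (fun a => pvGet a "expected_quality" == some "high")
  let low_ads := calibration_ads.filter (fun a => pvGet a "expected_quality" == some "low")
  let high_ref := match high_ads with
    | [] => "N/A"
    | a :: _ => pvFmt a
  let low_ref := match low_ads with
    | [] => "N/A"
    | a :: _ => pvFmt a
  (high_ref, low_ref)

-- ===== PORT B =====
def pvStep (acc : Option String × Option String) (ad : List (String × String)) :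
    Option String × Option String :=
  let q := (pvGet ad "expected_quality").getD ""
  if q == "high" && acc.1 == none then (some (pvFmt ad), acc.2)
  else if q == "low" && acc.2 == none then (acc.1, some (pvFmt ad))
  else acc

def pick_references_py_alt (calibration_ads : List (List (String × String))) : String × String :=
  let acc := calibration_ads.foldl pvStep (none, none)
  (acc.1.getD "N/A", acc.2.getD "N/A")

-- ===== PRECONDITION & SPEC =====
def pvHasKeys (ad : List (String × String)) : Prop :=
  (pvGet ad "primary_text").isSome ∧ (pvGet ad "headline").isSome ∧
  (pvGet ad "description").isSome ∧ (pvGet ad "cta_button").isSome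

-- Pre_ excludes exactly the inputs where the Python A raises KeyError: some ad misses
-- "expected_quality", or the first high / first low ad misses one of the four formatted keys.
def Pre_pick_references_py (calibration_ads : List (List (String × String))) : Prop :=
  (∀ ad ∈ calibration_ads, (pvGet ad "expected_quality").isSome) ∧
  (∀ ad ∈ (calibration_ads.find? (fun a => pvGet a "expected_quality" == some "high")).toList, pvHasKeys ad) ∧
  (∀ ad ∈ (calibration_ads.find? (fun a => pvGet a "expected_quality" == some "low")).toList, pvHasKeys ad)

instance (calibration_ads : List (List (String × String))) : Decidable (Pre_pick_references_py calibration_ads) := by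
  unfold Pre_pick_references_py pvHasKeys; infer_instance

def pvWitness_pick_references_py : (List (List (String × String))) :=
  [[("expected_quality", "high"), ("primary_text", "p"), ("headline", "h"),
    ("description", "d"), ("cta_button", "c")]]

def Spec_pick_references_py (calibration_ads : List (List (String × String))) (out : String × String) : Prop := out = pick_references_py_alt calibration_ads
instance (calibration_ads : List (List (String × String))) (out : String × String) : Decidable (Spec_pick_references_py calibration_ads out) := by unfold Spec_pick_references_py; infer_instance

-- ===== CLAIM (what is proved, stated in full; the proofs are below) =====
def Claim_equal_pick_references_py : Prop := ∀ (calibration_ads : List (List (String × String))), Dom_pick_references_py calibration_ads → Pre_pick_references_py calibration_ads → Spec_pick_references_py calibration_ads (pick_references_py calibration_ads)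

-- ===== LEMMAS AND PROOFS =====

-- B's string test equals A's Option test ("" is neither "high" nor "low")
theorem pvGetD_beq (ad : List (String × String)) (k v : String) (hv : v ≠ "") :
    (((pvGet ad k).getD "" == v)) = (pvGet ad k == some v) := by
  cases h : pvGet ad k with
  | none => simp [Ne.symm hv]
  | some w => simp

theorem pvStep_hi_not_lo (ad : List (String × String))
    (h : (pvGet ad "expected_quality" == some "high") = true) :
    (pvGet ad "expected_quality" == some "low") = false := by
  simp_all

-- loop invariant: the fold fills each slot with the first matching ad, unless already filled
theorem fold_eq (ads : List (List (String × String))) :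
    ∀ (h l : Option String),
      ads.foldl pvStep (h, l) =
        (h.or ((ads.find? (fun a => pvGet a "expected_quality" == some "high")).map pvFmt),
         l.or ((ads.find? (fun a => pvGet a "expected_quality" == some "low")).map pvFmt)) := by
  induction ads with
  | nil => intro h l; simp
  | cons a ads ih =>
    intro h l
    simp only [List.foldl_cons, List.find?]
    by_cases hhi : (pvGet a "expected_quality" == some "high") = true
    · have hlo := pvStep_hi_not_lo a hhi
      cases h with
      | none =>
        simp [pvStep, pvGetD_beq, hhi, hlo, ih]
      | some x =>
        simp [pvStep, pvGetD_beq, hhi, hlo, ih]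
    · by_cases hlo : (pvGet a "expected_quality" == some "low") = true
      · cases l with
        | none => simp [pvStep, pvGetD_beq, hhi, hlo, ih]
        | some x => simp [pvStep, pvGetD_beq, hhi, hlo, ih]
      · simp [pvStep, pvGetD_beq, hhi, hlo, ih]

-- head of a filter = find?
theorem filter_head (p : List (String × String) → Bool) (l : List (List (String × String))) :
    (match l.filter p with
      | [] => "N/A"
      | a :: _ => pvFmt a) = ((l.find? p).map pvFmt).getD "N/A" := by
  induction l with
  | nil => rfl
  | cons a l ih =>
    by_cases h : p a = true
    · simp [List.filter, List.find?, h]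
    · simp [List.filter, List.find?, h, ih]

-- ===== VERDICT (by name: the statement is the Claim_ definition above) =====
theorem pick_references_py_spec : Claim_equal_pick_references_py := by
  intro ads _ _
  unfold Spec_pick_references_py pick_references_py pick_references_py_alt
  rw [fold_eq ads none none]
  simp only [Option.none_or]
  rw [filter_head, filter_head]
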